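-- pv_equiv track=rewrite | github.com/AllanKoder/Competitive-Programming-Training | practice/1400s/zero_remainder_array.py | solve
-- ===== SOURCE A (Python) =====
-- from collections import Counter
--
-- def solve(arr, k):
--     new_arr = [x % k for x in arr]
--     new_arr = list(filter(lambda x : x % k != 0, new_arr))
--     if len(new_arr) == 0:
--         return 0
--
--     c = Counter(new_arr)
--     key, loops = max(c.items(), key=lambda x: (x[1], -x[0]))
--     moves_needed = (loops-1)*k + (k-key)
--     return moves_needed + 1
-- ===== SOURCE B (Python) =====
-- def solve(arr, k):
--     # sort the nonzero residues, then scan runs of equal values: the longest run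
--     # (first one on ties, i.e. smallest residue) determines the answer c*k - r + 1
--     res = sorted(x % k for x in arr if x % k != 0)
--     prev = None
--     run = 0
--     best_c = 0
--     best_r = 0
--     for r in res:
--         run = run + 1 if prev == r else 1
--         prev = r
--         if run > best_c:
--             best_c = run
--             best_r = r
--     if best_c == 0:
--         return 0
--     return best_c * k - best_r + 1
-- ===== Notes on version B (the rewrite author's own statement) =====
-- stated objective: alternative
-- what changed: B replaces A's hash-based Counter-plus-max-over-items algorithm by sorting the nonzero residues and scanning runs of equal values: the longest run (first on ties, hence smallest residue) gives c*k - r + 1, using (loops-1)*k + (k-key) + 1 = loops*k - key + 1; no dictionary is built at all.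
import Mathlib
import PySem

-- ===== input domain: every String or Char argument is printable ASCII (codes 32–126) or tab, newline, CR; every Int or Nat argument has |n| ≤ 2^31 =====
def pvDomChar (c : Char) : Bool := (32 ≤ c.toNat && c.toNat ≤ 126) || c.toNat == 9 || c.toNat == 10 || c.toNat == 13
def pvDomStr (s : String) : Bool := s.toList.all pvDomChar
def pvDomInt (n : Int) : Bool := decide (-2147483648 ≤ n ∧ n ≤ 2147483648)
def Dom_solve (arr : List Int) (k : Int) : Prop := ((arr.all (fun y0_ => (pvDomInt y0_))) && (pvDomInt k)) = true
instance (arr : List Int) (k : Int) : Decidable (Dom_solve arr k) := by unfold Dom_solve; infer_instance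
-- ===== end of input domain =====

-- B sorts the nonzero residues and scans runs of equal values instead of A's Counter-then-max-over-items; same answer via (loops-1)*k + (k-key) + 1 = loops*k - key + 1 (alternative algorithm, no dictionary).


-- ===== PORT A =====
def solve (arr : List Int) (k : Int) : Int :=
  let newArr := arr.map (fun x => PySem.Int.mod x k)
  let newArr2 := newArr.filter (fun x => PySem.Int.mod x k != 0)
  if newArr2.length = 0 then 0
  else
    match PySem.List.max2? (PySem.Dict.counter newArr2).items (fun p => p.2) (fun p => -p.1) with
    | some (key, loops) => ((loops - 1) * k + (k - key)) + 1
    | none => 0   -- unreachable: newArr2 is nonempty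

-- ===== PORT B =====
-- loop body of Source B's run-scan over the sorted residues; state = (prev, run, best_c, best_r)
def solveAltStep (st : Option Int × Int × Int × Int) (r : Int) :
    Option Int × Int × Int × Int :=
  let run := if st.1 = some r then st.2.1 + 1 else 1
  if run > st.2.2.1 then (some r, run, run, r) else (some r, run, st.2.2.1, st.2.2.2)

def solve_alt (arr : List Int) (k : Int) : Int :=
  let res := PySem.List.sorted
    ((arr.filter (fun x => PySem.Int.mod x k != 0)).map (fun x => PySem.Int.mod x k))
    (fun x => x) false
  let st := res.foldl solveAltStep (none, 0, 0, 0)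
  if st.2.2.1 = 0 then 0 else st.2.2.1 * k - st.2.2.2 + 1

-- ===== PRECONDITION & SPEC =====
-- Pre_ excludes only k = 0 with a nonempty arr, where Python's '%' raises ZeroDivisionError in both A and B.
def Pre_solve (arr : List Int) (k : Int) : Prop := arr = [] ∨ k ≠ 0
instance (arr : List Int) (k : Int) : Decidable (Pre_solve arr k) := by unfold Pre_solve; infer_instance
def pvWitness_solve : List Int × Int := ([1, 2, 2], 3)

def Spec_solve (arr : List Int) (k : Int) (out : Int) : Prop := out = solve_alt arr k
instance (arr : List Int) (k : Int) (out : Int) : Decidable (Spec_solve arr k out) := by unfold Spec_solve; infer_instance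

-- ===== CLAIM (what is proved, stated in full; the proofs are below) =====
def Claim_equal_solve : Prop := ∀ (arr : List Int) (k : Int), Dom_solve arr k → Pre_solve arr k → Spec_solve arr k (solve arr k)

-- ===== LEMMAS AND PROOFS =====

-- the filtered residue list both programs effectively work on
def pvF (k : Int) (arr : List Int) : List Int :=
  (arr.map (fun x => PySem.Int.mod x k)).filter (fun x => x != 0)

-- strict lexicographic order on (count, -key) for a pair (key, count)
def pvLt (a b : Int × Int) : Prop := a.2 < b.2 ∨ (a.2 = b.2 ∧ -a.1 < -b.1)

lemma pv_mod_idem (a k : Int) : PySem.Int.mod (PySem.Int.mod a k) k = PySem.Int.mod a k := by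
  simp [PySem.Int.mod]

-- A's filtered list is pvF
lemma pv_filter_eq (arr : List Int) (k : Int) :
    (arr.map (fun x => PySem.Int.mod x k)).filter (fun x => PySem.Int.mod x k != 0) = pvF k arr := by
  unfold pvF
  rw [List.filter_map, List.filter_map]
  congr 1
  apply List.filter_congr
  intro x _
  simp [pv_mod_idem]

-- B's pre-sort list is pvF too (Python's generator filters then maps)
lemma pv_filter_map_eq (arr : List Int) (k : Int) :
    (arr.filter (fun x => PySem.Int.mod x k != 0)).map (fun x => PySem.Int.mod x k) = pvF k arr := by
  unfold pvF
  rw [List.filter_map]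
  rfl

-- invariant of B's fold over a sorted (nondecreasing) prefix P
def pvInvB (P : List Int) (st : Option Int × Int × Int × Int) : Prop :=
  (P = [] ∧ st = (none, 0, 0, 0)) ∨
  (∃ m, m ∈ P ∧ (∀ v ∈ P, v ≤ m) ∧ st.1 = some m ∧ st.2.1 = (P.count m : Int) ∧
    st.2.2.2 ∈ P ∧ st.2.2.1 = (P.count st.2.2.2 : Int) ∧
    ∀ v ∈ P, v ≠ st.2.2.2 → pvLt (v, (P.count v : Int)) (st.2.2.2, st.2.2.1))

lemma pv_count_append (P : List Int) (x v : Int) :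
    ((P ++ [x]).count v : Int) = (P.count v : Int) + (if v = x then 1 else 0) := by
  rw [List.count_append]
  by_cases hv : v = x
  · subst hv; simp
  · have : ¬x = v := fun h => hv h.symm
    simp [hv, this]

lemma pv_inv_fold (S : List Int) (hS : S.Pairwise (· ≤ ·)) :
    pvInvB S (S.foldl solveAltStep (none, 0, 0, 0)) := by
  induction S using List.reverseRecOn with
  | nil => exact Or.inl ⟨rfl, rfl⟩
  | append_singleton P x ih =>
      have hP : P.Pairwise (· ≤ ·) := (List.pairwise_append.mp hS).1
      have hle : ∀ v ∈ P, v ≤ x := by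
        intro v hv
        exact (List.pairwise_append.mp hS).2.2 v hv x (List.mem_singleton_self x)
      rw [List.foldl_append]
      simp only [List.foldl_cons, List.foldl_nil]
      rcases ih hP with ⟨hPnil, hst⟩ | ⟨m, hm, hmax, hprev, hrun, hbr, hbc, hdom⟩
      · subst hPnil
        rw [hst]
        have hstep : solveAltStep (none, 0, 0, 0) x = (some x, 1, 1, x) := by
          simp [solveAltStep]
        rw [hstep]
        exact Or.inr ⟨x, by simp, by simp, rfl, by simp, by simp, by simp, by simp⟩
      · rcases hfold : P.foldl solveAltStep (none, 0, 0, 0) with ⟨prev, run, bc, br⟩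
        rw [hfold] at hprev hrun hbr hbc hdom
        dsimp only at hprev hrun hbr hbc hdom
        subst hprev
        by_cases hxm : m = x
        · -- x continues the run of m
          subst hxm
          have hstep : solveAltStep (some m, run, bc, br) m =
              (if run + 1 > bc then (some m, run + 1, run + 1, m)
               else (some m, run + 1, bc, br)) := by
            simp [solveAltStep]
          rw [hstep]
          have hcx : ((P ++ [m]).count m : Int) = run + 1 := by
            rw [pv_count_append, if_pos rfl, hrun]
          have hmaxnew : ∀ v ∈ P ++ [m], v ≤ m := by
            intro v hv
            rcases List.mem_append.mp hv with h | h
            · exact hle v h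
            · simp at h; omega
          split_ifs with hupd
          · refine Or.inr ⟨m, List.mem_append.mpr (Or.inr (by simp)), hmaxnew, rfl,
              by dsimp only; rw [hcx], List.mem_append.mpr (Or.inr (by simp)),
              by dsimp only; rw [hcx], ?_⟩
            intro v hv hvne
            dsimp only at hvne ⊢
            have hvP : v ∈ P := by
              rcases List.mem_append.mp hv with h | h
              · exact h
              · exact absurd (List.mem_singleton.mp h) hvne
            have hcv : ((P ++ [m]).count v : Int) = (P.count v : Int) := by
              rw [pv_count_append, if_neg hvne]; ring
            by_cases hvb : v = br
            · subst hvb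
              unfold pvLt; dsimp only
              rw [hcv, ← hbc]; omega
            · have := hdom v hvP hvb
              unfold pvLt at this ⊢; dsimp only at this ⊢
              rw [hcv]
              rcases this with h | ⟨h, _⟩
              · left; omega
              · left; omega
          · -- best kept; then br ≠ m (else bc = count br P = count m P = run < run + 1 ≤ bc)
            have hbrne : br ≠ m := by
              intro h
              subst h
              rw [hbc, ← hrun] at hupd
              omega
            refine Or.inr ⟨m, List.mem_append.mpr (Or.inr (by simp)), hmaxnew, rfl,
              by dsimp only; rw [hcx], List.mem_append.mpr (Or.inl hbr), ?_, ?_⟩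
            · dsimp only
              rw [pv_count_append, if_neg hbrne, hbc]; ring
            · intro v hv hvne
              dsimp only at hvne ⊢
              by_cases hvm : v = m
              · subst hvm
                unfold pvLt; dsimp only
                rw [hcx]
                by_cases hq : run + 1 < bc
                · left; omega
                · right
                  refine ⟨by omega, ?_⟩
                  have h1 : br ≤ v := hle br hbr
                  omega
              · have hvP : v ∈ P := by
                  rcases List.mem_append.mp hv with h | h
                  · exact h
                  · exact absurd (List.mem_singleton.mp h) hvm
                have := hdom v hvP hvne
                have hcv : ((P ++ [m]).count v : Int) = (P.count v : Int) := by
                  rw [pv_count_append, if_neg hvm]; ring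
                unfold pvLt at this ⊢; dsimp only at this ⊢
                rw [hcv]
                exact this
        · -- x starts a new run: x ∉ P since x is ≥ all of P and ≠ its maximum m
          have hmx : m < x := lt_of_le_of_ne (hle m hm) hxm
          have hxP : x ∉ P := fun h => absurd (hmax x h) (by omega)
          have hcnt0 : (P.count x : Int) = 0 := by
            simp [List.count_eq_zero_of_not_mem hxP]
          have hcx : ((P ++ [x]).count x : Int) = 1 := by
            rw [pv_count_append, if_pos rfl, hcnt0]; ring
          have hbrne : br ≠ x := fun h => hxP (h ▸ hbr)
          have hbcpos : 0 < bc := by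
            have h1 : 0 < P.count br := List.count_pos_iff.mpr hbr
            omega
          have hstep : solveAltStep (some m, run, bc, br) x = (some x, 1, bc, br) := by
            have h1 : ((some m : Option Int) = some x) = False := by simp [hxm]
            simp only [solveAltStep, h1, if_false]
            rw [if_neg (by omega)]
          rw [hstep]
          refine Or.inr ⟨x, List.mem_append.mpr (Or.inr (by simp)), ?_, rfl,
            by dsimp only; rw [hcx], List.mem_append.mpr (Or.inl hbr), ?_, ?_⟩
          · intro v hv
            rcases List.mem_append.mp hv with h | h
            · exact le_trans (hmax v h) (le_of_lt hmx)
            · simp at h; omega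
          · dsimp only
            rw [pv_count_append, if_neg hbrne, hbc]; ring
          · intro v hv hvne
            dsimp only at hvne ⊢
            by_cases hvx : v = x
            · subst hvx
              unfold pvLt; dsimp only
              rw [hcx]
              by_cases hq : (1 : Int) < bc
              · left; omega
              · right
                refine ⟨by omega, ?_⟩
                have h1 : br ≤ m := hmax br hbr
                omega
            · have hvP : v ∈ P := by
                rcases List.mem_append.mp hv with h | h
                · exact h
                · exact absurd (List.mem_singleton.mp h) hvx
              have := hdom v hvP hvne
              have hcv : ((P ++ [x]).count v : Int) = (P.count v : Int) := by
                rw [pv_count_append, if_neg hvx]; ring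
              unfold pvLt at this ⊢; dsimp only at this ⊢
              rw [hcv]
              exact this

-- the foldl body of PySem.List.max2? with our keys
def pvM2Step (acc : Option (Int × Int)) (x : Int × Int) : Option (Int × Int) :=
  match acc with
  | none => some x
  | some m =>
    if (decide (m.2 < x.2) || !decide (x.2 < m.2) && decide (-m.1 < -x.1)) = true then some x
    else some m

lemma pv_max2_eq_foldl (xs : List (Int × Int)) :
    PySem.List.max2? xs (fun p => p.2) (fun p => -p.1) = xs.foldl pvM2Step none := by
  simp only [PySem.List.max2?]
  congr 1
  funext acc x
  cases acc <;> rfl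

lemma pv_max2_aux (m : Int × Int) :
    ∀ (t : List (Int × Int)) (a : Int × Int),
      (∀ y ∈ t, y ≠ m → pvLt y m) → (a = m ∨ pvLt a m) → (m ∈ t ∨ a = m) →
      t.foldl pvM2Step (some a) = some m := by
  intro t
  induction t with
  | nil =>
      intro a _ _ hmem
      rcases hmem with h | h
      · cases h
      · simp [h]
  | cons x t ih =>
      intro a hdomt ha hmem
      have hx : x = m ∨ pvLt x m := by
        by_cases h : x = m
        · exact Or.inl h
        · exact Or.inr (hdomt x (List.mem_cons_self) h)
      have hstep : pvM2Step (some a) x =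
          if (decide (a.2 < x.2) || !decide (x.2 < a.2) && decide (-a.1 < -x.1)) = true then some x
          else some a := rfl
      rw [List.foldl_cons, hstep]
      have hdomt' : ∀ y ∈ t, y ≠ m → pvLt y m := fun y hy => hdomt y (List.mem_cons_of_mem _ hy)
      split_ifs with hcond
      · apply ih _ hdomt' hx
        rcases hx with h | h
        · exact Or.inr h
        · rcases hmem with hmt | ham
          · rcases List.mem_cons.mp hmt with h1 | h1
            · exact Or.inr h1.symm
            · exact Or.inl h1
          · exfalso
            subst ham
            unfold pvLt at h
            simp only [Bool.or_eq_true, decide_eq_true_eq, Bool.and_eq_true,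
              Bool.not_eq_true', decide_eq_false_iff_not] at hcond
            omega
      · apply ih _ hdomt' ha
        rcases hmem with hmt | ham
        · rcases List.mem_cons.mp hmt with h1 | h1
          · subst h1
            rcases ha with h | h
            · exact Or.inr h
            · exfalso
              unfold pvLt at h
              simp only [Bool.or_eq_true, decide_eq_true_eq, Bool.and_eq_true,
                Bool.not_eq_true', decide_eq_false_iff_not] at hcond
              omega
          · exact Or.inl h1
        · exact Or.inr ham

lemma pv_max2_unique (xs : List (Int × Int)) (m : Int × Int)
    (hm : m ∈ xs) (hdom : ∀ y ∈ xs, y ≠ m → pvLt y m) :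
    PySem.List.max2? xs (fun p => p.2) (fun p => -p.1) = some m := by
  rw [pv_max2_eq_foldl]
  cases xs with
  | nil => cases hm
  | cons x t =>
      have hx : pvM2Step none x = some x := rfl
      rw [List.foldl_cons, hx]
      apply pv_max2_aux m t x
      · intro y hy; exact hdom y (List.mem_cons_of_mem _ hy)
      · by_cases h : x = m
        · exact Or.inl h
        · exact Or.inr (hdom x (List.mem_cons_self) h)
      · rcases List.mem_cons.mp hm with h | h
        · exact Or.inr h.symm
        · exact Or.inl h

-- ===== VERDICT (by name: the statement is the Claim_ definition above) =====
theorem solve_spec : Claim_equal_solve := by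
  intro arr k _ _
  unfold Spec_solve solve solve_alt
  simp only []
  rw [pv_filter_eq, pv_filter_map_eq]
  set F := pvF k arr with hF
  set S := PySem.List.sorted F (fun x => x) false with hSdef
  have hperm : S.Perm F := PySem.List.sorted_perm F (fun x => x) false
  have hpw : S.Pairwise (· ≤ ·) := by
    have := PySem.List.sorted_pairwise F (fun x => x)
    simpa using this
  have hinv := pv_inv_fold S hpw
  set st := S.foldl solveAltStep (none, 0, 0, 0) with hst
  rcases hinv with ⟨hSnil, hst0⟩ | ⟨m, _, _, _, _, hbr, hbc, hdom⟩
  · have hFnil : F = [] := by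
      have := hperm; rw [hSnil] at this
      exact (List.Perm.nil_eq this).symm
    rw [hFnil, hst0]
    simp
  · have hbrF : st.2.2.2 ∈ F := hperm.mem_iff.mp hbr
    have hFne : F ≠ [] := by intro h; rw [h] at hbrF; cases hbrF
    have hcounts : ∀ v : Int, (S.count v : Int) = (F.count v : Int) := by
      intro v; rw [hperm.count_eq]
    have hcpos : 0 < F.count st.2.2.2 := List.count_pos_iff.mpr hbrF
    rw [if_neg (by simp [hFne]), if_neg (by rw [hbc, hcounts]; omega)]
    have hmax : PySem.List.max2? (PySem.Dict.counter F).items (fun p => p.2) (fun p => -p.1) =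
        some (st.2.2.2, st.2.2.1) := by
      rw [PySem.Dict.items_counter]
      apply pv_max2_unique
      · have hmem : st.2.2.2 ∈ PySem.Set.ofList F := by
          rw [PySem.Set.mem_ofList]; exact hbrF
        have := List.mem_map_of_mem (f := fun v => (v, (F.count v : Int))) hmem
        simpa [hbc, hcounts] using this
      · intro y hy hyne
        obtain ⟨v, hv, rfl⟩ := List.mem_map.mp hy
        have hvF : v ∈ F := by simpa [PySem.Set.mem_ofList] using hv
        have hvS : v ∈ S := hperm.mem_iff.mpr hvF
        have hvne : v ≠ st.2.2.2 := by
          intro h; subst h; apply hyne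
          rw [hbc, hcounts]
        have := hdom v hvS hvne
        unfold pvLt at this ⊢
        rw [hcounts] at this
        rcases this with h | ⟨h1, h2⟩
        · left; exact h
        · right; exact ⟨h1, h2⟩
    rw [hmax]
    ring
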